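-- pv_equiv track=rewrite | github.com/RLPgh/MarkItDown-Converter | src/core/pdf_processor.py | _merge_split_tables
-- ===== SOURCE A (Python) =====
-- def _merge_split_tables(lines: list[str]) -> list[str]:
--     """
--     Merge tables that were split across pages.
--
--     When a table spans multiple pages, pymupdf4llm may output:
--     - Table header + some rows
--     - Page break content
--     - Table header again (repeated) + remaining rows
--
--     This method detects and merges such tables.
--
--     Args:
--         lines: List of markdown lines.
--
--     Returns:
--         Lines with merged tables.
--     """
--     result = []
--     i = 0
--
--     while i < len(lines):
--         line = lines[i]
--
--         # Check if this is a table row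
--         if line.strip().startswith("|") and line.strip().endswith("|"):
--             # Collect the entire table
--             table_lines = [line]
--             table_header = line.strip()
--             i += 1
--
--             while i < len(lines):
--                 current = lines[i].strip()
--
--                 if current.startswith("|") and current.endswith("|"):
--                     # Check if this is a repeated header (table continuation)
--                     if current == table_header and len(table_lines) > 2:
--                         # Skip repeated header
--                         i += 1
--                         # Also skip the separator line if present
--                         if i < len(lines) and lines[i].strip().startswith("|") and "-" in lines[i]:
--                             i += 1
--                         continue
--                     table_lines.append(lines[i])
--                     i += 1
--                 elif not current:
--                     # Empty line - might be end of table or just spacing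
--                     # Look ahead to see if table continues
--                     look_ahead = i + 1
--                     while look_ahead < len(lines) and not lines[look_ahead].strip():
--                         look_ahead += 1
--
--                     if look_ahead < len(lines) and lines[look_ahead].strip().startswith("|"):
--                         # Table continues, skip empty lines
--                         i = look_ahead
--                     else:
--                         # Table ends
--                         break
--                 else:
--                     # Non-table content, table ends
--                     break
--
--             result.extend(table_lines)
--         else:
--             result.append(line)
--             i += 1
--
--     return result
-- ===== SOURCE B (Python) =====
-- def _merge_split_tables(lines: list[str]) -> list[str]:
--     """Single-pass rewrite: one loop over the lines with explicit state
--     (current table buffer, remembered header, pending blank lines, and a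
--     skip-separator sub-state after a repeated header)."""
--     out = []
--     table = []      # accumulated lines of the current table ([] = not in a table)
--     header = ""     # stripped first line of the current table
--     blanks = []     # blank lines seen while inside a table, not yet emitted
--     skip_sep = False  # just skipped a repeated header; next line may be its separator
--     for line in lines:
--         s = line.strip()
--         if table:
--             if skip_sep:
--                 skip_sep = False
--                 if s.startswith("|") and "-" in line:
--                     continue
--             if s.startswith("|"):
--                 blanks = []  # blanks followed by a '|' line are dropped
--                 if s.endswith("|"):
--                     if s == header and len(table) > 2:
--                         skip_sep = True
--                     else:
--                         table.append(line)
--                     continue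
--                 # starts with '|' but is not a full row: table ends here
--                 out.extend(table)
--                 table = []
--                 out.append(line)
--             elif not s:
--                 blanks.append(line)
--             else:
--                 # ordinary content: table ends, held blanks are re-emitted
--                 out.extend(table)
--                 out.extend(blanks)
--                 table = []
--                 blanks = []
--                 out.append(line)
--         else:
--             if s.startswith("|") and s.endswith("|"):
--                 table = [line]
--                 header = s
--             else:
--                 out.append(line)
--     if table:
--         out.extend(table)
--         out.extend(blanks)
--     return out
-- ===== Notes on version B (the rewrite author's own statement) =====
-- stated objective: alternative
-- what changed: Replaced A's index-driven outer loop with nested collection loop and blank-line look-ahead by a single structural pass over the lines with explicit state (table buffer, remembered header, pending-blank buffer, skip-separator flag), so each line is examined once instead of being re-visited by look-ahead and re-entry.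
import Mathlib
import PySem

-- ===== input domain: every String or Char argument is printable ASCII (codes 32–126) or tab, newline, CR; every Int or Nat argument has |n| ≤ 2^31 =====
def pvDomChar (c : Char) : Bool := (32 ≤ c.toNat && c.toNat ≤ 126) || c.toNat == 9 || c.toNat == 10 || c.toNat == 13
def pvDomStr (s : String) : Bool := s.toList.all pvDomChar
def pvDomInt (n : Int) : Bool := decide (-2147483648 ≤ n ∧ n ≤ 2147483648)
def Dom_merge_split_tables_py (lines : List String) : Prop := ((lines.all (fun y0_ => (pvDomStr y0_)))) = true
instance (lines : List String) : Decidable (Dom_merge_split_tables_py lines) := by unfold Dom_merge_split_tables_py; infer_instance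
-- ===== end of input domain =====

-- ===== PORT A =====
-- B is a single-pass state machine replacing A's index-driven nested loops; same return value (alternative decomposition).
-- look-ahead over blank lines (the inner 'while look_ahead < len and not lines[look_ahead].strip()')
def pvLookAhead (lines : List String) (j : Nat) : Nat :=
  if h : j < lines.length ∧ PySem.Str.strip (lines.getD j "") == "" then
    pvLookAhead lines (j + 1)
  else j
termination_by lines.length - j
decreasing_by exact Nat.sub_lt_sub_left h.1 (Nat.lt_succ_self j)

-- A's inner table-collection loop: returns (table_lines, i) at the moment the loop exits
def pvInnerA (lines : List String) (header : String) (tbl : List String) (i : Nat) : List String × Nat :=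
  if h : i < lines.length then
    if PySem.Str.startswith (PySem.Str.strip (lines.getD i "")) "|"
         && PySem.Str.endswith (PySem.Str.strip (lines.getD i "")) "|" then
      if PySem.Str.strip (lines.getD i "") == header && decide (tbl.length > 2) then
        -- skip the repeated header; also skip the separator line if present
        if i + 1 < lines.length ∧ PySem.Str.startswith (PySem.Str.strip (lines.getD (i + 1) "")) "|" = true
             ∧ PySem.Str.isIn "-" (lines.getD (i + 1) "") = true then
          pvInnerA lines header tbl (i + 2)
        else
          pvInnerA lines header tbl (i + 1)
      else
        pvInnerA lines header (tbl ++ [lines.getD i ""]) (i + 1)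
    else if PySem.Str.strip (lines.getD i "") == "" then
      if pvLookAhead lines (i + 1) < lines.length
           ∧ PySem.Str.startswith (PySem.Str.strip (lines.getD (pvLookAhead lines (i + 1)) "")) "|" = true then
        -- 'max (i+1)' is only a termination device: pvLookAhead lines (i+1) ≥ i+1 always (pvLookAhead_ge below)
        pvInnerA lines header tbl (max (i + 1) (pvLookAhead lines (i + 1)))
      else (tbl, i)
    else (tbl, i)
  else (tbl, i)
termination_by lines.length - i
decreasing_by
  · exact Nat.sub_lt_sub_left h (Nat.lt_add_of_pos_right (by decide))
  · exact Nat.sub_lt_sub_left h (Nat.lt_succ_self i)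
  · exact Nat.sub_lt_sub_left h (Nat.lt_succ_self i)
  · exact Nat.sub_lt_sub_left h (Nat.lt_of_lt_of_le (Nat.lt_succ_self i) (le_max_left _ _))

-- A's outer loop
def pvOuterA (lines : List String) (i : Nat) (result : List String) : List String :=
  if h : i < lines.length then
    if PySem.Str.startswith (PySem.Str.strip (lines.getD i "")) "|"
         && PySem.Str.endswith (PySem.Str.strip (lines.getD i "")) "|" then
      -- 'max (i+1)' is only a termination device: the inner loop never moves i backwards (pvInnerA_ge below)
      pvOuterA lines (max (i + 1) (pvInnerA lines (PySem.Str.strip (lines.getD i "")) [lines.getD i ""] (i + 1)).2)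
        (result ++ (pvInnerA lines (PySem.Str.strip (lines.getD i "")) [lines.getD i ""] (i + 1)).1)
    else
      pvOuterA lines (i + 1) (result ++ [lines.getD i ""])
  else result
termination_by lines.length - i
decreasing_by
  · exact Nat.sub_lt_sub_left h (Nat.lt_of_lt_of_le (Nat.lt_succ_self i) (le_max_left _ _))
  · exact Nat.sub_lt_sub_left h (Nat.lt_succ_self i)

def merge_split_tables_py (lines : List String) : List String :=
  pvOuterA lines 0 []

-- ===== PORT B =====
-- single pass with explicit state: out, current table buffer, pending blanks, remembered header, skip-separator flag
def pvLoopB (lines : List String) (out table blanks : List String) (header : String) (skipSep : Bool) :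
    List String :=
  match lines with
  | [] => if table.isEmpty then out else (out ++ table) ++ blanks
  | line :: rest =>
    if table.isEmpty then
      if PySem.Str.startswith (PySem.Str.strip line) "|" && PySem.Str.endswith (PySem.Str.strip line) "|" then
        pvLoopB rest out [line] blanks (PySem.Str.strip line) skipSep
      else
        pvLoopB rest (out ++ [line]) [] blanks header skipSep
    else
      if skipSep && (PySem.Str.startswith (PySem.Str.strip line) "|" && PySem.Str.isIn "-" line) then
        pvLoopB rest out table blanks header false
      else
        if PySem.Str.startswith (PySem.Str.strip line) "|" then
          if PySem.Str.endswith (PySem.Str.strip line) "|" then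
            if PySem.Str.strip line == header && decide (table.length > 2) then
              pvLoopB rest out table [] header true
            else
              pvLoopB rest out (table ++ [line]) [] header false
          else
            pvLoopB rest ((out ++ table) ++ [line]) [] [] header false
        else if PySem.Str.strip line == "" then
          pvLoopB rest out table (blanks ++ [line]) header false
        else
          pvLoopB rest (((out ++ table) ++ blanks) ++ [line]) [] [] header false

def merge_split_tables_py_alt (lines : List String) : List String :=
  pvLoopB lines [] [] [] "" false

-- ===== PRECONDITION & SPEC =====
def Spec_merge_split_tables_py (lines : List String) (out : List String) : Prop := out = merge_split_tables_py_alt lines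
instance (lines : List String) (out : List String) : Decidable (Spec_merge_split_tables_py lines out) := by unfold Spec_merge_split_tables_py; infer_instance

-- ===== CLAIM (what is proved, stated in full; the proofs are below) =====
def Claim_equal_merge_split_tables_py : Prop := ∀ (lines : List String), Dom_merge_split_tables_py lines → Spec_merge_split_tables_py lines (merge_split_tables_py lines)

-- ===== LEMMAS AND PROOFS =====

theorem pvLookAhead_ge (lines : List String) (j : Nat) : j ≤ pvLookAhead lines j := by
  unfold pvLookAhead
  split
  · have := pvLookAhead_ge lines (j + 1); omega
  · exact le_refl j
termination_by lines.length - j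
decreasing_by omega

theorem pvInnerA_ge (lines : List String) (header : String) (tbl : List String) (i : Nat) :
    i ≤ (pvInnerA lines header tbl i).2 := by
  unfold pvInnerA
  split
  · split
    · split
      · split
        · have := pvInnerA_ge lines header tbl (i + 2); omega
        · have := pvInnerA_ge lines header tbl (i + 1); omega
      · have := pvInnerA_ge lines header (tbl ++ [lines.getD i ""]) (i + 1); omega
    · split
      · split
        · exact Nat.le_trans (Nat.le_succ i) (Nat.le_trans (le_max_left _ _)
            (pvInnerA_ge lines header tbl (max (i + 1) (pvLookAhead lines (i + 1)))))
        · exact le_refl i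
      · exact le_refl i
  · exact le_refl i
termination_by lines.length - i
decreasing_by
  all_goals exact Nat.sub_lt_sub_left (by omega) (by first | exact Nat.lt_of_lt_of_le (Nat.lt_succ_self i) (le_max_left _ _) | omega)


theorem pvDropCons (lines : List String) (i : Nat) (h : i < lines.length) :
    List.drop i lines = lines.getD i "" :: List.drop (i + 1) lines := by
  rw [List.getD_eq_getElem lines "" h]
  exact List.drop_eq_getElem_cons h

theorem pvLookAhead_stop (lines : List String) (j : Nat)
    (h : ¬ (j < lines.length ∧ PySem.Str.strip (lines.getD j "") == "")) :
    pvLookAhead lines j = j := by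
  rw [pvLookAhead, dif_neg h]

theorem pvLookAhead_step (lines : List String) (j : Nat)
    (h : j < lines.length ∧ PySem.Str.strip (lines.getD j "") == "") :
    pvLookAhead lines j = pvLookAhead lines (j + 1) := by
  conv_lhs => rw [pvLookAhead]
  rw [dif_pos h]

-- the empty string does not start with "|"
theorem pvEmpty_not_startswith (s : String) (h : (s == "") = true) :
    PySem.Str.startswith s "|" = false := by
  have : s = "" := eq_of_beq h
  subst this
  decide

-- single-step unfolding lemmas for A's loops (each rewrites exactly one application)
theorem pvOuterA_stop (lines : List String) (i : Nat) (res : List String)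
    (h : ¬ i < lines.length) : pvOuterA lines i res = res := by
  rw [pvOuterA, dif_neg h]

theorem pvOuterA_row (lines : List String) (i : Nat) (res : List String)
    (h : i < lines.length)
    (hrow : (PySem.Str.startswith (PySem.Str.strip (lines.getD i "")) "|"
        && PySem.Str.endswith (PySem.Str.strip (lines.getD i "")) "|") = true) :
    pvOuterA lines i res
      = pvOuterA lines (pvInnerA lines (PySem.Str.strip (lines.getD i "")) [lines.getD i ""] (i + 1)).2
          (res ++ (pvInnerA lines (PySem.Str.strip (lines.getD i "")) [lines.getD i ""] (i + 1)).1) := by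
  conv_lhs => rw [pvOuterA]
  rw [dif_pos h, if_pos hrow,
    Nat.max_eq_right (pvInnerA_ge lines (PySem.Str.strip (lines.getD i "")) [lines.getD i ""] (i + 1))]

theorem pvOuterA_plain (lines : List String) (i : Nat) (res : List String)
    (h : i < lines.length)
    (hrow : ¬ (PySem.Str.startswith (PySem.Str.strip (lines.getD i "")) "|"
        && PySem.Str.endswith (PySem.Str.strip (lines.getD i "")) "|") = true) :
    pvOuterA lines i res = pvOuterA lines (i + 1) (res ++ [lines.getD i ""]) := by
  conv_lhs => rw [pvOuterA]
  rw [dif_pos h, if_neg hrow]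

theorem pvInnerA_stop (lines : List String) (hh : String) (t : List String) (i : Nat)
    (h : ¬ i < lines.length) : pvInnerA lines hh t i = (t, i) := by
  rw [pvInnerA, dif_neg h]

theorem pvInnerA_hdr_sep (lines : List String) (hh : String) (t : List String) (i : Nat)
    (h : i < lines.length)
    (hrow : (PySem.Str.startswith (PySem.Str.strip (lines.getD i "")) "|"
        && PySem.Str.endswith (PySem.Str.strip (lines.getD i "")) "|") = true)
    (hhdr : (PySem.Str.strip (lines.getD i "") == hh && decide (t.length > 2)) = true)
    (hsep : i + 1 < lines.length ∧ PySem.Str.startswith (PySem.Str.strip (lines.getD (i + 1) "")) "|" = true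
        ∧ PySem.Str.isIn "-" (lines.getD (i + 1) "") = true) :
    pvInnerA lines hh t i = pvInnerA lines hh t (i + 2) := by
  conv_lhs => rw [pvInnerA]
  rw [dif_pos h, if_pos hrow, if_pos hhdr, if_pos hsep]

theorem pvInnerA_hdr_nosep (lines : List String) (hh : String) (t : List String) (i : Nat)
    (h : i < lines.length)
    (hrow : (PySem.Str.startswith (PySem.Str.strip (lines.getD i "")) "|"
        && PySem.Str.endswith (PySem.Str.strip (lines.getD i "")) "|") = true)
    (hhdr : (PySem.Str.strip (lines.getD i "") == hh && decide (t.length > 2)) = true)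
    (hsep : ¬ (i + 1 < lines.length ∧ PySem.Str.startswith (PySem.Str.strip (lines.getD (i + 1) "")) "|" = true
        ∧ PySem.Str.isIn "-" (lines.getD (i + 1) "") = true)) :
    pvInnerA lines hh t i = pvInnerA lines hh t (i + 1) := by
  conv_lhs => rw [pvInnerA]
  rw [dif_pos h, if_pos hrow, if_pos hhdr, if_neg hsep]

theorem pvInnerA_row (lines : List String) (hh : String) (t : List String) (i : Nat)
    (h : i < lines.length)
    (hrow : (PySem.Str.startswith (PySem.Str.strip (lines.getD i "")) "|"
        && PySem.Str.endswith (PySem.Str.strip (lines.getD i "")) "|") = true)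
    (hhdr : ¬ (PySem.Str.strip (lines.getD i "") == hh && decide (t.length > 2)) = true) :
    pvInnerA lines hh t i = pvInnerA lines hh (t ++ [lines.getD i ""]) (i + 1) := by
  conv_lhs => rw [pvInnerA]
  rw [dif_pos h, if_pos hrow, if_neg hhdr]

theorem pvInnerA_blank_cont (lines : List String) (hh : String) (t : List String) (i : Nat)
    (h : i < lines.length)
    (hrow : ¬ (PySem.Str.startswith (PySem.Str.strip (lines.getD i "")) "|"
        && PySem.Str.endswith (PySem.Str.strip (lines.getD i "")) "|") = true)
    (hemp : (PySem.Str.strip (lines.getD i "") == "") = true)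
    (hla : pvLookAhead lines (i + 1) < lines.length
        ∧ PySem.Str.startswith (PySem.Str.strip (lines.getD (pvLookAhead lines (i + 1)) "")) "|" = true) :
    pvInnerA lines hh t i = pvInnerA lines hh t (pvLookAhead lines (i + 1)) := by
  conv_lhs => rw [pvInnerA]
  rw [dif_pos h, if_neg hrow, if_pos hemp, if_pos hla,
    Nat.max_eq_right (pvLookAhead_ge lines (i + 1))]

theorem pvInnerA_blank_stop (lines : List String) (hh : String) (t : List String) (i : Nat)
    (h : i < lines.length)
    (hrow : ¬ (PySem.Str.startswith (PySem.Str.strip (lines.getD i "")) "|"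
        && PySem.Str.endswith (PySem.Str.strip (lines.getD i "")) "|") = true)
    (hemp : (PySem.Str.strip (lines.getD i "") == "") = true)
    (hla : ¬ (pvLookAhead lines (i + 1) < lines.length
        ∧ PySem.Str.startswith (PySem.Str.strip (lines.getD (pvLookAhead lines (i + 1)) "")) "|" = true)) :
    pvInnerA lines hh t i = (t, i) := by
  conv_lhs => rw [pvInnerA]
  rw [dif_pos h, if_neg hrow, if_pos hemp, if_neg hla]

theorem pvInnerA_break (lines : List String) (hh : String) (t : List String) (i : Nat)
    (h : i < lines.length)
    (hrow : ¬ (PySem.Str.startswith (PySem.Str.strip (lines.getD i "")) "|"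
        && PySem.Str.endswith (PySem.Str.strip (lines.getD i "")) "|") = true)
    (hemp : ¬ (PySem.Str.strip (lines.getD i "") == "") = true) :
    pvInnerA lines hh t i = (t, i) := by
  conv_lhs => rw [pvInnerA]
  rw [dif_pos h, if_neg hrow, if_neg hemp]

-- The main simulation lemma: the four reachable state shapes of B's single pass,
-- each equated with the corresponding residual computation of A.
theorem pvMain (n : Nat) : ∀ (lines : List String) (i : Nat), lines.length - i = n →
    ∀ (out table : List String) (header : String),
    (pvLoopB (List.drop i lines) out [] [] header false = pvOuterA lines i out) ∧
    (table ≠ [] →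
      pvLoopB (List.drop i lines) out table [] header false
        = pvOuterA lines (pvInnerA lines header table i).2 (out ++ (pvInnerA lines header table i).1)) ∧
    (table ≠ [] →
      pvLoopB (List.drop i lines) out table [] header true
        = (if i < lines.length ∧ PySem.Str.startswith (PySem.Str.strip (lines.getD i "")) "|" = true
               ∧ PySem.Str.isIn "-" (lines.getD i "") = true
           then pvOuterA lines (pvInnerA lines header table (i + 1)).2
                  (out ++ (pvInnerA lines header table (i + 1)).1)
           else pvOuterA lines (pvInnerA lines header table i).2
                  (out ++ (pvInnerA lines header table i).1))) ∧
    (∀ bs : List String, table ≠ [] → bs ≠ [] → (∀ b ∈ bs, (PySem.Str.strip b == "") = true) →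
      pvLoopB (List.drop i lines) out table bs header false
        = (if pvLookAhead lines i < lines.length
               ∧ PySem.Str.startswith (PySem.Str.strip (lines.getD (pvLookAhead lines i) "")) "|" = true
           then pvOuterA lines (pvInnerA lines header table (pvLookAhead lines i)).2
                  (out ++ (pvInnerA lines header table (pvLookAhead lines i)).1)
           else pvOuterA lines i ((out ++ table) ++ bs))) := by
  induction n using Nat.strong_induction_on with
  | _ n IH =>
  intro lines i hn out table header
  by_cases hi : i < lines.length
  · have hdrop := pvDropCons lines i hi
    have ihp := fun (o t : List String) (hh : String) =>
      IH (lines.length - (i + 1)) (by omega) lines (i + 1) rfl o t hh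
    have hS2 : ∀ (o t : List String) (hh : String), t ≠ [] →
        pvLoopB (List.drop i lines) o t [] hh false
          = pvOuterA lines (pvInnerA lines hh t i).2 (o ++ (pvInnerA lines hh t i).1) := by
      intro o t hh ht
      have ht' : t.isEmpty = false := by cases t with | nil => exact absurd rfl ht | cons a l => rfl
      by_cases hc1 : PySem.Str.startswith (PySem.Str.strip (lines.getD i "")) "|" = true
      · by_cases hc2 : PySem.Str.endswith (PySem.Str.strip (lines.getD i "")) "|" = true
        · have hrow : (PySem.Str.startswith (PySem.Str.strip (lines.getD i "")) "|"
              && PySem.Str.endswith (PySem.Str.strip (lines.getD i "")) "|") = true := by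
            rw [hc1, hc2]; rfl
          by_cases hh2 : (PySem.Str.strip (lines.getD i "") == hh && decide (t.length > 2)) = true
          · -- repeated header: B enters the skip-separator state, A skips in place
            have lhs : pvLoopB (List.drop i lines) o t [] hh false
                = pvLoopB (List.drop (i + 1) lines) o t [] hh true := by
              rw [hdrop]; simp only [pvLoopB, ht', hc1, hc2, hh2, Bool.false_and, Bool.true_and, Bool.and_true, Bool.and_false, Bool.and_self, Bool.false_eq_true, if_false, if_true, List.append_nil, List.nil_append, reduceIte]
            rw [lhs, (ihp o t hh).2.2.1 ht]
            by_cases hsep : i + 1 < lines.length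
                ∧ PySem.Str.startswith (PySem.Str.strip (lines.getD (i + 1) "")) "|" = true
                ∧ PySem.Str.isIn "-" (lines.getD (i + 1) "") = true
            · rw [if_pos hsep, pvInnerA_hdr_sep lines hh t i hi hrow hh2 hsep]
            · rw [if_neg hsep, pvInnerA_hdr_nosep lines hh t i hi hrow hh2 hsep]
          · -- ordinary row: both append it
            have lhs : pvLoopB (List.drop i lines) o t [] hh false
                = pvLoopB (List.drop (i + 1) lines) o (t ++ [lines.getD i ""]) [] hh false := by
              rw [hdrop]; simp only [pvLoopB, ht', hc1, hc2, hh2, Bool.false_and, Bool.true_and, Bool.and_true, Bool.and_false, Bool.and_self, Bool.false_eq_true, if_false, if_true, List.append_nil, List.nil_append, reduceIte]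
            rw [lhs, (ihp o (t ++ [lines.getD i ""]) hh).2.1 (by simp),
              pvInnerA_row lines hh t i hi hrow hh2]
        · -- starts with '|' but no full row: the table ends here
          have hrow : ¬ (PySem.Str.startswith (PySem.Str.strip (lines.getD i "")) "|"
              && PySem.Str.endswith (PySem.Str.strip (lines.getD i "")) "|") = true :=
            by intro hcon; rw [Bool.and_eq_true] at hcon; exact hc2 hcon.2
          have hemp : ¬ (PySem.Str.strip (lines.getD i "") == "") = true := by
            intro h
            rw [pvEmpty_not_startswith _ h] at hc1
            exact Bool.false_ne_true hc1
          have lhs : pvLoopB (List.drop i lines) o t [] hh false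
              = pvLoopB (List.drop (i + 1) lines) ((o ++ t) ++ [lines.getD i ""]) [] [] hh false := by
            rw [hdrop]; simp only [pvLoopB, ht', hc1, hc2, Bool.false_and, Bool.true_and, Bool.and_true, Bool.and_false, Bool.and_self, Bool.false_eq_true, if_false, if_true, List.append_nil, List.nil_append, reduceIte]
          rw [lhs, (ihp ((o ++ t) ++ [lines.getD i ""]) [] hh).1,
            pvInnerA_break lines hh t i hi hrow hemp]
          show pvOuterA lines (i + 1) ((o ++ t) ++ [lines.getD i ""]) = pvOuterA lines i (o ++ t)
          rw [pvOuterA_plain lines i (o ++ t) hi hrow]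
      · have hrow : ¬ (PySem.Str.startswith (PySem.Str.strip (lines.getD i "")) "|"
            && PySem.Str.endswith (PySem.Str.strip (lines.getD i "")) "|") = true :=
          by intro hcon; rw [Bool.and_eq_true] at hcon; exact hc1 hcon.1
        by_cases hc3 : (PySem.Str.strip (lines.getD i "") == "") = true
        · -- blank line: B starts buffering blanks, A looks ahead
          have lhs : pvLoopB (List.drop i lines) o t [] hh false
              = pvLoopB (List.drop (i + 1) lines) o t [lines.getD i ""] hh false := by
            rw [hdrop]; simp only [pvLoopB, ht', hc1, hc3, Bool.false_and, Bool.true_and, Bool.and_true, Bool.and_false, Bool.and_self, Bool.false_eq_true, if_false, if_true, List.append_nil, List.nil_append, reduceIte]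
          rw [lhs, (ihp o t hh).2.2.2 [lines.getD i ""] ht (by simp)
            (by intro b hb; rw [List.mem_singleton] at hb; subst hb; exact hc3)]
          by_cases hcond : pvLookAhead lines (i + 1) < lines.length
              ∧ PySem.Str.startswith (PySem.Str.strip (lines.getD (pvLookAhead lines (i + 1)) "")) "|" = true
          · rw [if_pos hcond, pvInnerA_blank_cont lines hh t i hi hrow hc3 hcond]
          · rw [if_neg hcond, pvInnerA_blank_stop lines hh t i hi hrow hc3 hcond]
            show pvOuterA lines (i + 1) ((o ++ t) ++ [lines.getD i ""]) = pvOuterA lines i (o ++ t)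
            rw [pvOuterA_plain lines i (o ++ t) hi hrow]
        · -- ordinary content: the table ends here
          have lhs : pvLoopB (List.drop i lines) o t [] hh false
              = pvLoopB (List.drop (i + 1) lines) ((o ++ t) ++ [lines.getD i ""]) [] [] hh false := by
            rw [hdrop]; simp only [pvLoopB, ht', hc1, hc3, Bool.false_and, Bool.true_and, Bool.and_true, Bool.and_false, Bool.and_self, Bool.false_eq_true, if_false, if_true, List.append_nil, List.nil_append, reduceIte]
          rw [lhs, (ihp ((o ++ t) ++ [lines.getD i ""]) [] hh).1,
            pvInnerA_break lines hh t i hi hrow hc3]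
          show pvOuterA lines (i + 1) ((o ++ t) ++ [lines.getD i ""]) = pvOuterA lines i (o ++ t)
          rw [pvOuterA_plain lines i (o ++ t) hi hrow]
    refine ⟨?_, fun ht => hS2 out table header ht, ?_, ?_⟩
    · -- S1: not inside a table
      by_cases hrow : (PySem.Str.startswith (PySem.Str.strip (lines.getD i "")) "|"
          && PySem.Str.endswith (PySem.Str.strip (lines.getD i "")) "|") = true
      · have lhs : pvLoopB (List.drop i lines) out [] [] header false
            = pvLoopB (List.drop (i + 1) lines) out [lines.getD i ""] []
                (PySem.Str.strip (lines.getD i "")) false := by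
          rw [hdrop]; simp only [pvLoopB, List.isEmpty_nil, hrow, Bool.false_and, Bool.true_and, Bool.and_true, Bool.and_false, Bool.and_self, Bool.false_eq_true, if_false, if_true, List.append_nil, List.nil_append, reduceIte]
        rw [lhs, (ihp out [lines.getD i ""] (PySem.Str.strip (lines.getD i ""))).2.1 (by simp),
          pvOuterA_row lines i out hi hrow]
      · have lhs : pvLoopB (List.drop i lines) out [] [] header false
            = pvLoopB (List.drop (i + 1) lines) (out ++ [lines.getD i ""]) [] [] header false := by
          rw [hdrop]; simp only [pvLoopB, List.isEmpty_nil, hrow, Bool.false_and, Bool.true_and, Bool.and_true, Bool.and_false, Bool.and_self, Bool.false_eq_true, if_false, if_true, List.append_nil, List.nil_append, reduceIte]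
        rw [lhs, (ihp (out ++ [lines.getD i ""]) [] header).1, pvOuterA_plain lines i out hi hrow]
    · -- S3: the skip-separator state
      intro ht
      have ht' : table.isEmpty = false := by cases table with | nil => exact absurd rfl ht | cons a l => rfl
      by_cases hsep : i < lines.length
          ∧ PySem.Str.startswith (PySem.Str.strip (lines.getD i "")) "|" = true
          ∧ PySem.Str.isIn "-" (lines.getD i "") = true
      · obtain ⟨-, hc1', hdash⟩ := hsep
        have lhs : pvLoopB (List.drop i lines) out table [] header true
            = pvLoopB (List.drop (i + 1) lines) out table [] header false := by
          rw [hdrop]; simp only [pvLoopB, ht', hc1', hdash, Bool.false_and, Bool.true_and, Bool.and_true, Bool.and_false, Bool.and_self, Bool.false_eq_true, if_false, if_true, List.append_nil, List.nil_append, reduceIte]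
        rw [lhs, (ihp out table header).2.1 ht, if_pos ⟨hi, hc1', hdash⟩]
      · have hg : (PySem.Str.startswith (PySem.Str.strip (lines.getD i "")) "|"
            && PySem.Str.isIn "-" (lines.getD i "")) = false := by
          cases h1 : PySem.Str.startswith (PySem.Str.strip (lines.getD i "")) "|"
          · rfl
          · cases h2 : PySem.Str.isIn "-" (lines.getD i "")
            · rfl
            · exact absurd ⟨hi, h1, h2⟩ hsep
        have heq : pvLoopB (List.drop i lines) out table [] header true
            = pvLoopB (List.drop i lines) out table [] header false := by
          rw [hdrop]; simp only [pvLoopB, ht', hg, Bool.false_and, Bool.true_and, Bool.and_true, Bool.and_false, Bool.and_self, Bool.false_eq_true, if_false, if_true, List.append_nil, List.nil_append, reduceIte]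
        rw [heq, hS2 out table header ht, if_neg hsep]
    · -- S4: pending blank lines inside a table
      intro bs ht hbs hbl
      have ht' : table.isEmpty = false := by cases table with | nil => exact absurd rfl ht | cons a l => rfl
      by_cases hc1 : PySem.Str.startswith (PySem.Str.strip (lines.getD i "")) "|" = true
      · have hc3 : ¬ (PySem.Str.strip (lines.getD i "") == "") = true := by
          intro h
          rw [pvEmpty_not_startswith _ h] at hc1
          exact Bool.false_ne_true hc1
        have hla : pvLookAhead lines i = i :=
          pvLookAhead_stop lines i (by rintro ⟨-, h⟩; exact hc3 h)
        rw [hla, if_pos ⟨hi, hc1⟩]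
        have heq : pvLoopB (List.drop i lines) out table bs header false
            = pvLoopB (List.drop i lines) out table [] header false := by
          rw [hdrop]; simp only [pvLoopB, ht', hc1, Bool.false_and, Bool.true_and, Bool.and_true, Bool.and_false, Bool.and_self, Bool.false_eq_true, if_false, if_true, List.append_nil, List.nil_append, reduceIte]
        rw [heq, hS2 out table header ht]
      · have hrow : ¬ (PySem.Str.startswith (PySem.Str.strip (lines.getD i "")) "|"
            && PySem.Str.endswith (PySem.Str.strip (lines.getD i "")) "|") = true :=
          by intro hcon; rw [Bool.and_eq_true] at hcon; exact hc1 hcon.1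
        by_cases hc3 : (PySem.Str.strip (lines.getD i "") == "") = true
        · have hla : pvLookAhead lines i = pvLookAhead lines (i + 1) :=
            pvLookAhead_step lines i ⟨hi, hc3⟩
          have lhs : pvLoopB (List.drop i lines) out table bs header false
              = pvLoopB (List.drop (i + 1) lines) out table (bs ++ [lines.getD i ""]) header false := by
            rw [hdrop]; simp only [pvLoopB, ht', hc1, hc3, Bool.false_and, Bool.true_and, Bool.and_true, Bool.and_false, Bool.and_self, Bool.false_eq_true, if_false, if_true, List.append_nil, List.nil_append, reduceIte]
          rw [lhs, (ihp out table header).2.2.2 (bs ++ [lines.getD i ""]) ht (by simp)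
            (by intro b hb
                rcases List.mem_append.mp hb with h | h
                · exact hbl b h
                · rw [List.mem_singleton] at h; subst h; exact hc3)]
          rw [hla]
          by_cases hcond : pvLookAhead lines (i + 1) < lines.length
              ∧ PySem.Str.startswith (PySem.Str.strip (lines.getD (pvLookAhead lines (i + 1)) "")) "|" = true
          · rw [if_pos hcond, if_pos hcond]
          · rw [if_neg hcond, if_neg hcond,
              pvOuterA_plain lines i ((out ++ table) ++ bs) hi hrow]
            simp [List.append_assoc]
        · have hla : pvLookAhead lines i = i :=
            pvLookAhead_stop lines i (by rintro ⟨-, h⟩; exact hc3 h)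
          rw [hla, if_neg (fun h => hc1 h.2)]
          have lhs : pvLoopB (List.drop i lines) out table bs header false
              = pvLoopB (List.drop (i + 1) lines) (((out ++ table) ++ bs) ++ [lines.getD i ""]) [] [] header false := by
            rw [hdrop]; simp only [pvLoopB, ht', hc1, hc3, Bool.false_and, Bool.true_and, Bool.and_true, Bool.and_false, Bool.and_self, Bool.false_eq_true, if_false, if_true, List.append_nil, List.nil_append, reduceIte]
          rw [lhs, (ihp (((out ++ table) ++ bs) ++ [lines.getD i ""]) [] header).1,
            pvOuterA_plain lines i ((out ++ table) ++ bs) hi hrow]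
  · -- i past the end of the list
    have hdrop : List.drop i lines = [] := List.drop_eq_nil_of_le (by omega)
    have hla : pvLookAhead lines i = i := pvLookAhead_stop lines i (fun h => hi h.1)
    refine ⟨?_, ?_, ?_, ?_⟩
    · rw [hdrop, pvOuterA_stop lines i out hi]; simp [pvLoopB]
    · intro ht
      have ht' : table.isEmpty = false := by cases table with | nil => exact absurd rfl ht | cons a l => rfl
      rw [hdrop, pvInnerA_stop lines header table i hi]
      show pvLoopB [] out table [] header false = pvOuterA lines i (out ++ table)
      rw [pvOuterA_stop lines i _ hi]
      simp [pvLoopB, ht']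
    · intro ht
      have ht' : table.isEmpty = false := by cases table with | nil => exact absurd rfl ht | cons a l => rfl
      rw [hdrop, if_neg (fun h => hi h.1), pvInnerA_stop lines header table i hi]
      show pvLoopB [] out table [] header true = pvOuterA lines i (out ++ table)
      rw [pvOuterA_stop lines i _ hi]
      simp [pvLoopB, ht']
    · intro bs ht hbs hbl
      have ht' : table.isEmpty = false := by cases table with | nil => exact absurd rfl ht | cons a l => rfl
      rw [hdrop, hla, if_neg (fun h => hi h.1), pvOuterA_stop lines i _ hi]
      simp [pvLoopB, ht']

-- ===== VERDICT (by name: the statement is the Claim_ definition above) =====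
theorem merge_split_tables_py_spec : Claim_equal_merge_split_tables_py := by
  intro lines _
  unfold Spec_merge_split_tables_py merge_split_tables_py merge_split_tables_py_alt
  have h := (pvMain (lines.length - 0) lines 0 rfl [] [] "").1
  simpa using h.symm
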